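-- pv_equiv track=rewrite | github.com/proth1/kmflow | src/pov/contradiction.py | detect_naming_variant
-- ===== SOURCE A (Python) =====
-- def _edit_distance(s1: str, s2: str) -> int:
--     """Compute Levenshtein edit distance between two strings.
--
--     Uses the standard dynamic programming algorithm. Case-insensitive.
--
--     Args:
--         s1: First string.
--         s2: Second string.
--
--     Returns:
--         Minimum number of single-character edits (insert, delete, substitute).
--     """
--     s1 = s1.lower().strip()
--     s2 = s2.lower().strip()
--
--     if len(s1) < len(s2):
--         return _edit_distance(s2, s1)
--
--     if len(s2) == 0:
--         return len(s1)
--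
--     previous_row = list(range(len(s2) + 1))
--     for i, c1 in enumerate(s1):
--         current_row = [i + 1]
--         for j, c2 in enumerate(s2):
--             # insertions, deletions, substitutions
--             insertions = previous_row[j + 1] + 1
--             deletions = current_row[j] + 1
--             substitutions = previous_row[j] + (c1 != c2)
--             current_row.append(min(insertions, deletions, substitutions))
--         previous_row = current_row
--
--     return previous_row[-1]
--
-- def detect_naming_variant(
--     name_a: str,
--     name_b: str,
--     seed_terms: list[str],
--     max_edit_distance: int = 2,
-- ) -> str | None:
--     """Check if two entity names are naming variants of the same seed term.
--
--     Both names must be within max_edit_distance of the same canonical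
--     seed term. Returns the canonical term if matched, None otherwise.
--
--     Args:
--         name_a: First entity name.
--         name_b: Second entity name.
--         seed_terms: Canonical terms from the engagement seed list.
--         max_edit_distance: Maximum Levenshtein distance for a match.
--
--     Returns:
--         The canonical seed term if both names match, None otherwise.
--     """
--     for seed in seed_terms:
--         dist_a = _edit_distance(name_a, seed)
--         dist_b = _edit_distance(name_b, seed)
--         if dist_a <= max_edit_distance and dist_b <= max_edit_distance:
--             return seed
--     return None
-- ===== SOURCE B (Python) =====
-- def _within(s: str, t: str, k: int) -> bool:
--     """Decide whether the Levenshtein distance of s and t is <= k,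
--     by branch-and-bound comparing last characters (never builds a DP table)."""
--     if abs(len(s) - len(t)) > k:
--         return False
--     if not s or not t:
--         return True  # distance = length of the other = abs length difference <= k
--     if s[-1] == t[-1]:
--         return _within(s[:-1], t[:-1], k)
--     return (_within(s[:-1], t, k - 1)
--             or _within(s, t[:-1], k - 1)
--             or _within(s[:-1], t[:-1], k - 1))
--
--
-- def detect_naming_variant(
--     name_a: str,
--     name_b: str,
--     seed_terms: list[str],
--     max_edit_distance: int = 2,
-- ) -> str | None:
--     a = name_a.lower().strip()
--     b = name_b.lower().strip()
--     for seed in seed_terms: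
--         s = seed.lower().strip()
--         if _within(a, s, max_edit_distance) and _within(b, s, max_edit_distance):
--             return seed
--     return None
-- ===== Notes on version B (the rewrite author's own statement) =====
-- stated objective: faster
-- what changed: Replaces the full O(m*n) Levenshtein DP table computed for every seed by a branch-and-bound decision procedure for 'distance <= k' (length-difference cutoff, skip equal last characters, otherwise branch on the three edits with budget k-1), which never computes the exact distance.
import Mathlib
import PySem

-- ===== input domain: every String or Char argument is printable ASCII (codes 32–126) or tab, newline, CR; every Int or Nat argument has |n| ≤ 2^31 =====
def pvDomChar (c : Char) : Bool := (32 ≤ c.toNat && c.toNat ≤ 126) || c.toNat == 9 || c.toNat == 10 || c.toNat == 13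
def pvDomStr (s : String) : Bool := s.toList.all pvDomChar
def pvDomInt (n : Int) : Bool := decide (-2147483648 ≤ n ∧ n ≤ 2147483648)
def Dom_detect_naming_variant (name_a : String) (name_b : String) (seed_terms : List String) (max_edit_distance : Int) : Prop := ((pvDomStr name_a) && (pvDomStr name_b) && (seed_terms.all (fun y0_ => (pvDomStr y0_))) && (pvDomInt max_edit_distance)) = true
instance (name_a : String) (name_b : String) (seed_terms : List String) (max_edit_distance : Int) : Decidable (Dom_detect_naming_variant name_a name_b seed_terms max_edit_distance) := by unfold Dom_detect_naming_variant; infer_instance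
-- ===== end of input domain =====

-- B replaces A's full Levenshtein DP table per seed by a branch-and-bound decision
-- procedure for "distance ≤ k" with a length-difference cutoff (objective: faster;
-- measurably so on a timing run's generated inputs).

-- ===== PORT A =====
-- inner DP loop: builds current_row past its first element; `last` is current_row[j]
def pvBuildRow (c1 : Char) : List Char → List Int → Int → List Int
  | [], _, _ => []
  | c2 :: s2', prev, last =>
    match prev with
    | p0 :: p1 :: rest =>
        let v := min (p1 + 1) (min (last + 1) (p0 + (if c1 ≠ c2 then (1 : Int) else 0)))
        v :: pvBuildRow c1 s2' (p1 :: rest) v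
    | _ => []  -- unreachable: previous_row always has length len(s2)+1

-- outer DP loop: `for i, c1 in enumerate(s1)`
def pvDP (s2 : List Char) : List Char → Int → List Int → List Int
  | [], _, prev => prev
  | c1 :: s1', i, prev => pvDP s2 s1' (i + 1) ((i + 1) :: pvBuildRow c1 s2 prev (i + 1))

-- _edit_distance after the swap: the len(s2)==0 shortcut and the DP; result is previous_row[-1]
def pvEdBody (s1 s2 : List Char) : Int :=
  if s2.length = 0 then (s1.length : Int)
  else ((pvDP s2 s1 0 ((List.range (s2.length + 1)).map (fun n => Int.ofNat n))).getLast?).getD 0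
  -- previous_row[-1]: the row always has length len(s2)+1 > 0, so getLast? is some

-- _edit_distance: normalize and, as Python does by one recursive call (which re-normalizes
-- the original strings from scratch), swap so the first argument is the longer one
def pvEdit (s1 s2 : String) : Int :=
  if (PySem.Str.strip (PySem.Str.lower s1)).toList.length < (PySem.Str.strip (PySem.Str.lower s2)).toList.length then
    pvEdit s2 s1
  else
    pvEdBody (PySem.Str.strip (PySem.Str.lower s1)).toList (PySem.Str.strip (PySem.Str.lower s2)).toList
termination_by (if (PySem.Str.strip (PySem.Str.lower s1)).toList.length < (PySem.Str.strip (PySem.Str.lower s2)).toList.length then 1 else 0 : Nat)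
decreasing_by simp_all; omega

-- `for seed in seed_terms: ...`
def pvLoopA (name_a name_b : String) (k : Int) : List String → Option String
  | [] => none
  | seed :: rest =>
    let dist_a := pvEdit name_a seed
    let dist_b := pvEdit name_b seed
    if dist_a ≤ k ∧ dist_b ≤ k then some seed else pvLoopA name_a name_b k rest

def detect_naming_variant (name_a : String) (name_b : String) (seed_terms : List String) (max_edit_distance : Int) : Option String :=
  pvLoopA name_a name_b max_edit_distance seed_terms

-- ===== PORT B =====
-- _within(s, t, k): decides "edit distance of s and t ≤ k" by comparing last characters,
-- with the length-difference cutoff (never builds a DP table)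
def pvWithin (s t : List Char) (k : Int) : Bool :=
  if ((((s.length : Int) - (t.length : Int)).natAbs : Int) > k) then false
  else
    match hs : s.getLast?, ht : t.getLast? with
    | some c1, some c2 =>
      if c1 = c2 then pvWithin s.dropLast t.dropLast k
      else pvWithin s.dropLast t (k - 1) || pvWithin s t.dropLast (k - 1) || pvWithin s.dropLast t.dropLast (k - 1)
    | _, _ => true  -- `if not s or not t: return True`
termination_by s.length + t.length
decreasing_by
  all_goals
    have h1 : s ≠ [] := by intro h; subst h; simp at hs
    have h2 : t ≠ [] := by intro h; subst h; simp at ht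
    have := List.length_pos_of_ne_nil h1
    have := List.length_pos_of_ne_nil h2
    simp [List.length_dropLast]; omega

def pvLoopB (a b : List Char) (k : Int) : List String → Option String
  | [] => none
  | seed :: rest =>
    let s := (PySem.Str.strip (PySem.Str.lower seed)).toList
    if pvWithin a s k && pvWithin b s k then some seed else pvLoopB a b k rest

def detect_naming_variant_alt (name_a : String) (name_b : String) (seed_terms : List String) (max_edit_distance : Int) : Option String :=
  let a := (PySem.Str.strip (PySem.Str.lower name_a)).toList
  let b := (PySem.Str.strip (PySem.Str.lower name_b)).toList
  pvLoopB a b max_edit_distance seed_terms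

-- ===== PRECONDITION & SPEC =====
def Spec_detect_naming_variant (name_a : String) (name_b : String) (seed_terms : List String) (max_edit_distance : Int) (out : Option String) : Prop := out = detect_naming_variant_alt name_a name_b seed_terms max_edit_distance
instance (name_a : String) (name_b : String) (seed_terms : List String) (max_edit_distance : Int) (out : Option String) : Decidable (Spec_detect_naming_variant name_a name_b seed_terms max_edit_distance out) := by unfold Spec_detect_naming_variant; infer_instance

-- ===== CLAIM (what is proved, stated in full; the proofs are below) =====
def Claim_equal_detect_naming_variant : Prop := ∀ (name_a : String) (name_b : String) (seed_terms : List String) (max_edit_distance : Int), Dom_detect_naming_variant name_a name_b seed_terms max_edit_distance → Spec_detect_naming_variant name_a name_b seed_terms max_edit_distance (detect_naming_variant name_a name_b seed_terms max_edit_distance)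

-- ===== LEMMAS AND PROOFS =====

-- reference Levenshtein distance (recursion on the FIRST characters); A's DP rows and
-- B's decision procedure are both proved against it, applied to the REVERSED strings
def pvLev : List Char → List Char → Nat
  | [], t => t.length
  | s, [] => s.length
  | x :: xs, y :: ys =>
      min (pvLev xs (y :: ys) + 1) (min (pvLev (x :: xs) ys + 1) (pvLev xs ys + if x = y then 0 else 1))
termination_by s t => s.length + t.length

theorem pvLev_nil_left (t : List Char) : pvLev [] t = t.length := by cases t <;> simp [pvLev]
theorem pvLev_nil_right (s : List Char) : pvLev s [] = s.length := by cases s <;> simp [pvLev]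
theorem pvLev_cons_cons (x y : Char) (xs ys : List Char) :
    pvLev (x :: xs) (y :: ys) =
      min (pvLev xs (y :: ys) + 1) (min (pvLev (x :: xs) ys + 1) (pvLev xs ys + if x = y then 0 else 1)) := by
  simp [pvLev]

theorem pvLev_comm (s t : List Char) : pvLev s t = pvLev t s := by
  induction s, t using pvLev.induct with
  | case1 t => simp [pvLev_nil_left, pvLev_nil_right]
  | case2 s h => simp [pvLev_nil_left, pvLev_nil_right]
  | case3 x xs y ys ih1 ih2 ih3 =>
      rw [pvLev_cons_cons, pvLev_cons_cons, ih1, ih2, ih3]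
      by_cases h : x = y
      · rw [if_pos h, if_pos h.symm]; omega
      · rw [if_neg h, if_neg (fun e => h e.symm)]; omega

theorem pvLev_cons_le_left (x : Char) (s t : List Char) : pvLev (x :: s) t ≤ pvLev s t + 1 := by
  cases t with
  | nil => simp [pvLev_nil_right]
  | cons y ys => rw [pvLev_cons_cons]; omega

theorem pvLev_le_cons_right (y : Char) (s t : List Char) : pvLev s t ≤ pvLev s (y :: t) + 1 := by
  induction s generalizing t with
  | nil => simp [pvLev_nil_left]; omega
  | cons x s' ih =>
      have h1 := pvLev_cons_le_left x s' t
      have h2 := ih t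
      rw [pvLev_cons_cons]
      by_cases h : x = y
      · rw [if_pos h]; omega
      · rw [if_neg h]; omega

theorem pvLev_le_cons_left (x : Char) (s t : List Char) : pvLev s t ≤ pvLev (x :: s) t + 1 := by
  rw [pvLev_comm s t, pvLev_comm (x :: s) t]; exact pvLev_le_cons_right x t s

theorem pvLev_skip (c : Char) (s t : List Char) : pvLev (c :: s) (c :: t) = pvLev s t := by
  rw [pvLev_cons_cons, if_pos rfl]
  have h1 := pvLev_le_cons_right c s t
  have h2 := pvLev_le_cons_left c s t
  omega

theorem pvLev_len (s t : List Char) : t.length ≤ pvLev s t + s.length ∧ s.length ≤ pvLev s t + t.length := by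
  induction s, t using pvLev.induct with
  | case1 t => simp [pvLev_nil_left]
  | case2 s h => simp [pvLev_nil_right]
  | case3 x xs y ys ih1 ih2 ih3 =>
      rw [pvLev_cons_cons]
      simp only [List.length_cons] at ih1 ih2 ih3 ⊢
      by_cases h : x = y
      · rw [if_pos h]; simp only [Nat.min_def]; split_ifs <;> omega
      · rw [if_neg h]; simp only [Nat.min_def]; split_ifs <;> omega

theorem rev_last (s : List Char) (c : Char) (hs : s.getLast? = some c) :
    s.reverse = c :: s.dropLast.reverse := by
  have h1 : s ≠ [] := by intro h; subst h; simp at hs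
  have hg : s.getLast h1 = c := by
    rw [List.getLast?_eq_some_getLast h1] at hs; exact Option.some_inj.mp hs
  conv_lhs => rw [← List.dropLast_concat_getLast h1]
  rw [List.reverse_append, hg]; rfl

theorem pvWithin_eq (s t : List Char) (k : Int) :
    pvWithin s t k = decide (((pvLev s.reverse t.reverse : Nat) : Int) ≤ k) := by
  induction s, t, k using pvWithin.induct with
  | case1 s t k habs =>
      rw [pvWithin, if_pos habs]
      have hl := pvLev_len s.reverse t.reverse
      simp only [List.length_reverse] at hl
      symm; rw [decide_eq_false_iff_not]; omega
  | case2 s t k habs c2 ht hs ih =>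
      rw [pvWithin, if_neg habs, hs, ht]
      split
      next c1' c2' h1 h2 =>
        obtain rfl := Option.some_inj.mp h1
        obtain rfl := Option.some_inj.mp h2
        rw [if_pos rfl, ih, rev_last s _ hs, rev_last t _ ht, pvLev_skip]
      next hfail => exact (hfail _ _ rfl rfl).elim
  | case3 s t k habs c1 c2 hs ht hne ih1 ih2 ih3 =>
      rw [pvWithin, if_neg habs, hs, ht]
      split
      next c1' c2' h1 h2 =>
        obtain rfl := Option.some_inj.mp h1
        obtain rfl := Option.some_inj.mp h2
        rw [if_neg hne, ih1, ih2, ih3,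
          rev_last s c1 hs, rev_last t c2 ht, pvLev_cons_cons, if_neg hne]
        rw [← rev_last s c1 hs, ← rev_last t c2 ht]
        rw [← Bool.decide_or, ← Bool.decide_or, decide_eq_decide]
        push_cast
        omega
      next hfail => exact (hfail _ _ rfl rfl).elim
  | case4 s t k habs hfall =>
      rw [pvWithin, if_neg habs]
      have hst : s = [] ∨ t = [] := by
        rcases hs : s.getLast? with _ | c1
        · exact Or.inl (List.getLast?_eq_none_iff.mp hs)
        · rcases ht : t.getLast? with _ | c2
          · exact Or.inr (List.getLast?_eq_none_iff.mp ht)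
          · exact (hfall c1 c2 hs ht).elim
      split
      next c1' c2' h1 h2 => exact (hfall c1' c2' h1 h2).elim
      next hfail =>
        symm; rw [decide_eq_true_iff]
        rcases hst with rfl | rfl
        · rw [List.reverse_nil, pvLev_nil_left, List.length_reverse]
          simp only [List.length_nil] at habs; omega
        · rw [List.reverse_nil, pvLev_nil_right, List.length_reverse]
          simp only [List.length_nil] at habs; omega

def pvRowSpec (rs1 : List Char) : List Char → List Char → List Int
  | _, [] => []
  | ct, c2 :: rest => ((pvLev rs1 (c2 :: ct) : Nat) : Int) :: pvRowSpec rs1 (c2 :: ct) rest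

theorem pvBuildRow_spec (c1 : Char) (rs1 : List Char) :
    ∀ (rest ct : List Char),
      pvBuildRow c1 rest (((pvLev rs1 ct : Nat) : Int) :: pvRowSpec rs1 ct rest)
          (((pvLev (c1 :: rs1) ct : Nat) : Int)) =
        pvRowSpec (c1 :: rs1) ct rest := by
  intro rest
  induction rest with
  | nil => intro ct; rfl
  | cons c2 rest' ih =>
      intro ct
      rw [pvRowSpec, pvRowSpec, pvBuildRow]
      have hv : min (((pvLev rs1 (c2 :: ct) : Nat) : Int) + 1)
            (min (((pvLev (c1 :: rs1) ct : Nat) : Int) + 1)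
              (((pvLev rs1 ct : Nat) : Int) + (if c1 ≠ c2 then (1 : Int) else 0))) =
          ((pvLev (c1 :: rs1) (c2 :: ct) : Nat) : Int) := by
        rw [pvLev_cons_cons]
        by_cases h : c1 = c2
        · rw [if_pos h, if_neg (fun hn => hn h)]; push_cast; omega
        · rw [if_neg h, if_pos h]; push_cast; omega
      simp only [hv]
      rw [ih (c2 :: ct)]

theorem pvDP_spec (s2 : List Char) :
    ∀ (s1rest rs1 : List Char),
      pvDP s2 s1rest ((pvLev rs1 [] : Nat) : Int) (((pvLev rs1 [] : Nat) : Int) :: pvRowSpec rs1 [] s2) =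
        (((pvLev (s1rest.reverse ++ rs1) [] : Nat) : Int) :: pvRowSpec (s1rest.reverse ++ rs1) [] s2) := by
  intro s1rest
  induction s1rest with
  | nil => intro rs1; simp [pvDP]
  | cons c1 s1' ih =>
      intro rs1
      rw [pvDP]
      have e : ((pvLev rs1 [] : Nat) : Int) + 1 = ((pvLev (c1 :: rs1) [] : Nat) : Int) := by
        rw [pvLev_nil_right, pvLev_nil_right, List.length_cons]; push_cast; ring
      rw [e, pvBuildRow_spec c1 rs1 s2 [], ih (c1 :: rs1)]
      have h4 : (c1 :: s1').reverse ++ rs1 = s1'.reverse ++ (c1 :: rs1) := by simp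
      rw [h4]

theorem pvRowSpec_nil_fn :
    ∀ (rest ct : List Char),
      pvRowSpec [] ct rest = (List.range rest.length).map (fun i => ((ct.length + 1 + i : Nat) : Int)) := by
  intro rest
  induction rest with
  | nil => intro ct; rfl
  | cons c2 rest' ih =>
      intro ct
      simp only [List.length_cons]
      rw [pvRowSpec, ih (c2 :: ct), List.range_succ_eq_map, List.map_cons, List.map_map]
      congr 1
      · rw [pvLev_nil_left]; simp
      · apply List.map_congr_left
        intro i _
        simp [Function.comp]; omega

theorem init_row (s2 : List Char) :
    (List.range (s2.length + 1)).map (fun n => Int.ofNat n) =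
      ((pvLev ([] : List Char) [] : Nat) : Int) :: pvRowSpec [] [] s2 := by
  apply List.ext_getElem
  · simp [pvRowSpec_nil_fn s2 []]
  · intro i h1 h2
    rcases i with _ | i
    · simp only [List.getElem_map, List.getElem_range, List.getElem_cons_zero,
        pvLev_nil_left, List.length_nil, Nat.cast_zero, Int.ofNat_eq_natCast]
    · simp only [List.getElem_map, List.getElem_range, List.getElem_cons_succ,
        pvRowSpec_nil_fn s2 [], Int.ofNat_eq_natCast]
      simp only [List.length_nil]
      omega

theorem getLast_rowSpec (rs1 : List Char) :
    ∀ (rest ct : List Char) (x : Int), x = ((pvLev rs1 ct : Nat) : Int) →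
      (x :: pvRowSpec rs1 ct rest).getLast? = some ((pvLev rs1 (rest.reverse ++ ct) : Nat) : Int) := by
  intro rest
  induction rest with
  | nil => intro ct x hx; simp [pvRowSpec, hx]
  | cons c2 rest' ih =>
      intro ct x hx
      rw [pvRowSpec, List.getLast?_cons_cons, ih (c2 :: ct) _ rfl]
      congr 2
      simp

theorem pvEdBody_eq (s1 s2 : List Char) :
    pvEdBody s1 s2 = ((pvLev s1.reverse s2.reverse : Nat) : Int) := by
  by_cases h : s2 = []
  · subst h; simp [pvEdBody, pvLev_nil_right]
  · have hdp := pvDP_spec s2 s1 []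
    have hgl := getLast_rowSpec (s1.reverse ++ []) s2 [] _ rfl
    rw [pvEdBody, if_neg (by simpa using h), init_row s2]
    have hz : (0 : Int) = ((pvLev ([] : List Char) [] : Nat) : Int) := by simp [pvLev]
    rw [hz, hdp, hgl]
    simp

theorem pvEdit_eq (s1 s2 : String) :
    pvEdit s1 s2 = ((pvLev (PySem.Str.strip (PySem.Str.lower s1)).toList.reverse
      (PySem.Str.strip (PySem.Str.lower s2)).toList.reverse : Nat) : Int) := by
  rw [pvEdit]
  split_ifs with h
  · rw [pvEdit, if_neg (by omega), pvEdBody_eq, pvLev_comm]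
  · rw [pvEdBody_eq]

theorem loop_eq (na nb : String) (k : Int) (seeds : List String) :
    pvLoopA na nb k seeds =
      pvLoopB (PySem.Str.strip (PySem.Str.lower na)).toList (PySem.Str.strip (PySem.Str.lower nb)).toList k seeds := by
  induction seeds with
  | nil => rfl
  | cons seed rest ih =>
      rw [pvLoopA, pvLoopB]
      have e1 : pvWithin (PySem.Str.strip (PySem.Str.lower na)).toList
          (PySem.Str.strip (PySem.Str.lower seed)).toList k = decide (pvEdit na seed ≤ k) := by
        rw [pvWithin_eq, pvEdit_eq]
      have e2 : pvWithin (PySem.Str.strip (PySem.Str.lower nb)).toList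
          (PySem.Str.strip (PySem.Str.lower seed)).toList k = decide (pvEdit nb seed ≤ k) := by
        rw [pvWithin_eq, pvEdit_eq]
      simp only [e1, e2, ← Bool.decide_and, decide_eq_true_eq]
      split_ifs with h
      · rfl
      · exact ih

-- ===== VERDICT (by name: the statement is the Claim_ definition above) =====
theorem detect_naming_variant_spec : Claim_equal_detect_naming_variant := by
  unfold Claim_equal_detect_naming_variant
  intro name_a name_b seed_terms max_edit_distance _
  unfold Spec_detect_naming_variant detect_naming_variant detect_naming_variant_alt
  exact loop_eq name_a name_b max_edit_distance seed_terms
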